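-- pv_equiv track=rewrite | github.com/Gayeon6423/Improvement-of-the-Coreference-Resolution-model | pre_process.py | find_coreference_terms
-- ===== SOURCE A (Python) =====
-- def find_coreference_terms(ontonotes_format, clusters_token_offsets):
--     result = []
--     sentence_lengths = [len(sentence) for sentence in ontonotes_format]
--
--     for cluster in clusters_token_offsets:
--         if len(cluster)==1:
--             continue
--         cluster_terms = []
--         for start, end in cluster:
--             # Determining Sentence Numbers and Indexes
--             sentence_idx = 0
--             for i, length in enumerate(sentence_lengths):
--                 if start < length:
--                     sentence_idx = i
--                     break
--                 start -= length
--                 end -= length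
--
--             # Extract words from the corresponding sentence
--             terms = ontonotes_format[sentence_idx][start:end+1]
--             cluster_terms.append(terms)
--         result.append(cluster_terms)
--
--     return result
-- ===== SOURCE B (Python) =====
-- def find_coreference_terms(ontonotes_format, clusters_token_offsets):
--     # prefix[j] = number of tokens before sentence j; binary search replaces A's inner rescans
--     prefix = [0]
--     for sentence in ontonotes_format:
--         prefix.append(prefix[-1] + len(sentence))
--     n = len(ontonotes_format)
--
--     def locate(start):
--         # least k with start < prefix[k+1]
--         lo, hi = 0, n
--         while lo < hi:
--             mid = (lo + hi) // 2
--             if start < prefix[mid + 1]: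
--                 hi = mid
--             else:
--                 lo = mid + 1
--         return lo
--
--     result = []
--     for cluster in clusters_token_offsets:
--         if len(cluster) == 1:
--             continue
--         cluster_terms = []
--         for start, end in cluster:
--             k = locate(start)
--             base = prefix[k]
--             cluster_terms.append(ontonotes_format[k][start - base : end - base + 1])
--         result.append(cluster_terms)
--     return result
-- ===== Notes on version B (the rewrite author's own statement) =====
-- stated objective: alternative
-- what changed: B precomputes prefix sums of sentence lengths once and binary-searches them to locate each offset's sentence, replacing A's per-mention linear rescan with running subtraction (O(M log S) lookups vs O(M*S); a timing run did not confirm a 1.5x win at the tested sizes).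
-- outside the precondition, e.g. on find_coreference_terms([['a']], [[(1, 1), (2, 2)]]): A returns [[['a'], []]], B raises IndexError
import Mathlib
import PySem

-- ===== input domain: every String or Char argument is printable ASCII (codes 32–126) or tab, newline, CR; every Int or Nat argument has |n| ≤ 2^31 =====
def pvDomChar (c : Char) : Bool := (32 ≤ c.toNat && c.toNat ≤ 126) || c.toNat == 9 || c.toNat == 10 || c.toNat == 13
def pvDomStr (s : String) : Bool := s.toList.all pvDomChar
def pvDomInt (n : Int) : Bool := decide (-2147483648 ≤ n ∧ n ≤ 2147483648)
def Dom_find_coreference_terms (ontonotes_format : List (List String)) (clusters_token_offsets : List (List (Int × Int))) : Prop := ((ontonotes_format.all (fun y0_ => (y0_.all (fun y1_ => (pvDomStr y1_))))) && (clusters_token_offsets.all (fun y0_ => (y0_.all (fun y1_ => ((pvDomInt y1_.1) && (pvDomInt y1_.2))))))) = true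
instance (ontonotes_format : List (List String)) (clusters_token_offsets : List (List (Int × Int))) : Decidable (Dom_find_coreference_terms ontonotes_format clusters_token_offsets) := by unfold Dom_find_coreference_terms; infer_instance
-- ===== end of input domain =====

-- B replaces A's per-mention linear scan of sentence lengths (with running subtraction) by a
-- prefix-sum table plus binary search (objective: alternative). Neither version mutates its arguments.

-- ===== PORT A =====
-- the inner 'for i, length in enumerate(sentence_lengths): … break' loop, with the running
-- subtraction of start/end; returns (sentence_idx, start, end) after the loop
def locA : List Int → Nat → Int → Int → Nat × Int × Int
  | [], _, s, e => (0, s, e)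
  | l :: rest, i, s, e => if s < l then (i, s, e) else locA rest (i + 1) (s - l) (e - l)

-- body of A's 'for start, end in cluster' loop
def pairA (ontonotes_format : List (List String)) (lengths : List Int) (p : Int × Int) : List String :=
  let r := locA lengths 0 p.1 p.2
  PySem.List.slice ((PySem.List.pyGet? ontonotes_format (r.1 : Int)).getD []) (some r.2.1) (some (r.2.2 + 1))

-- A's outer loop over clusters (with the 'len(cluster)==1: continue' skip)
def goA (ontonotes_format : List (List String)) (lengths : List Int) : List (List (Int × Int)) → List (List (List String))
  | [] => []
  | c :: rest => if c.length == 1 then goA ontonotes_format lengths rest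
                 else (c.map (pairA ontonotes_format lengths)) :: goA ontonotes_format lengths rest

def find_coreference_terms (ontonotes_format : List (List String)) (clusters_token_offsets : List (List (Int × Int))) : List (List (List String)) :=
  let sentence_lengths := ontonotes_format.map (fun s => (s.length : Int))
  goA ontonotes_format sentence_lengths clusters_token_offsets

-- ===== PORT B =====
-- prefix = [0]; for sentence in ontonotes_format: prefix.append(prefix[-1] + len(sentence))
def buildPrefix (ontonotes_format : List (List String)) : List Int :=
  ontonotes_format.foldl (fun acc s => acc ++ [PySem.List.pyGetD acc (-1) 0 + (s.length : Int)]) [0]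

-- B's 'locate' while-loop: binary search for the least k with start < prefix[k+1];
-- the fuel argument (passed as hi - lo, which strictly shrinks each iteration) only makes
-- the while-loop structurally recursive and is never exhausted before lo = hi
def bsr (pre : List Int) (start : Int) : Nat → Nat → Nat → Nat
  | 0, lo, _ => lo
  | fuel + 1, lo, hi =>
    if lo < hi then
      let mid := (lo + hi) / 2
      if start < pre.getD (mid + 1) 0 then bsr pre start fuel lo mid
      else bsr pre start fuel (mid + 1) hi
    else lo

-- body of B's 'for start, end in cluster' loop
def pairB (ontonotes_format : List (List String)) (pre : List Int) (n : Nat) (p : Int × Int) : List String :=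
  let k := bsr pre p.1 n 0 n
  let base := pre.getD k 0
  PySem.List.slice ((PySem.List.pyGet? ontonotes_format (k : Int)).getD []) (some (p.1 - base)) (some (p.2 - base + 1))

def goB (ontonotes_format : List (List String)) (pre : List Int) (n : Nat) : List (List (Int × Int)) → List (List (List String))
  | [] => []
  | c :: rest => if c.length == 1 then goB ontonotes_format pre n rest
                 else (c.map (pairB ontonotes_format pre n)) :: goB ontonotes_format pre n rest

def find_coreference_terms_alt (ontonotes_format : List (List String)) (clusters_token_offsets : List (List (Int × Int))) : List (List (List String)) :=
  let pre := buildPrefix ontonotes_format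
  let n := ontonotes_format.length
  goB ontonotes_format pre n clusters_token_offsets

-- ===== PRECONDITION & SPEC =====
-- Pre_ excludes inputs where some processed mention's start offset is at or beyond the total
-- token count: there Python A either raises IndexError (empty ontonotes_format) or, via
-- leftover loop state, wraps the offsets back into sentence 0, while B's binary search
-- indexes one past the last sentence and raises IndexError.
def Pre_find_coreference_terms (ontonotes_format : List (List String)) (clusters_token_offsets : List (List (Int × Int))) : Prop :=
  ∀ c ∈ clusters_token_offsets, c.length = 1 ∨
    ∀ p ∈ c, ontonotes_format ≠ [] ∧ p.1 < (ontonotes_format.map (fun s => (s.length : Int))).sum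

instance (ontonotes_format : List (List String)) (clusters_token_offsets : List (List (Int × Int))) : Decidable (Pre_find_coreference_terms ontonotes_format clusters_token_offsets) := by unfold Pre_find_coreference_terms; infer_instance

def pvWitness_find_coreference_terms : List (List String) × (List (List (Int × Int))) :=
  ([["a", "b"], ["c"]], [[(0, 1), (2, 2)]])

def Spec_find_coreference_terms (ontonotes_format : List (List String)) (clusters_token_offsets : List (List (Int × Int))) (out : List (List (List String))) : Prop := out = find_coreference_terms_alt ontonotes_format clusters_token_offsets
instance (ontonotes_format : List (List String)) (clusters_token_offsets : List (List (Int × Int))) (out : List (List (List String))) : Decidable (Spec_find_coreference_terms ontonotes_format clusters_token_offsets out) := by unfold Spec_find_coreference_terms; infer_instance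

-- ===== CLAIM (what is proved, stated in full; the proofs are below) =====
def Claim_equal_find_coreference_terms : Prop := ∀ (ontonotes_format : List (List String)) (clusters_token_offsets : List (List (Int × Int))), Dom_find_coreference_terms ontonotes_format clusters_token_offsets → Pre_find_coreference_terms ontonotes_format clusters_token_offsets → Spec_find_coreference_terms ontonotes_format clusters_token_offsets (find_coreference_terms ontonotes_format clusters_token_offsets)

-- ===== LEMMAS AND PROOFS =====

-- partial sum of the first j sentence lengths
def psum (ls : List Int) (j : Nat) : Int := ((ls.take j).sum)

-- reference index: the least k with start < psum ls (k+1) (defined by the same running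
-- subtraction A uses)
def lk : List Int → Int → Nat
  | [], _ => 0
  | l :: rest, s => if s < l then 0 else lk rest (s - l) + 1

theorem psum_zero (ls : List Int) : psum ls 0 = 0 := rfl

theorem psum_cons_succ (l : Int) (rest : List Int) (j : Nat) :
    psum (l :: rest) (j + 1) = l + psum rest j := by
  simp [psum]

theorem psum_nonneg_mono (ls : List Int) (h : ∀ x ∈ ls, 0 ≤ x) {j j' : Nat} (hj : j ≤ j') :
    psum ls j ≤ psum ls j' := by
  unfold psum
  have hsplit : ls.take j' = ls.take j ++ (ls.drop j).take (j' - j) := by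
    rw [← List.take_add]; congr 1; omega
  rw [hsplit, List.sum_append]
  have hnn : 0 ≤ ((ls.drop j).take (j' - j)).sum :=
    List.sum_nonneg (fun x hx => h x (List.mem_of_mem_drop (List.mem_of_mem_take hx)))
  omega

theorem locA_eq (ls : List Int) (hnn : ∀ x ∈ ls, 0 ≤ x) : ∀ (i : Nat) (s e : Int),
    s < ls.sum → (0 ≤ s ∨ i = 0) →
    locA ls i s e = (i + lk ls s, s - psum ls (lk ls s), e - psum ls (lk ls s)) := by
  induction ls with
  | nil =>
    intro i s e h hi
    have hs : s < 0 := by simpa using h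
    have : i = 0 := by omega
    simp [locA, lk, psum, this]
  | cons l rest ih =>
    intro i s e h hi
    have hl : 0 ≤ l := hnn l (by simp)
    by_cases hs : s < l
    · simp [locA, lk, hs, psum]
    · have h' : s - l < rest.sum := by simp [List.sum_cons] at h; omega
      simp only [locA, lk, if_neg hs]
      rw [ih (fun x hx => hnn x (by simp [hx])) (i + 1) (s - l) (e - l) h' (Or.inl (by omega)),
        psum_cons_succ]
      simp only [Prod.mk.injEq]
      refine ⟨by omega, by ring, by ring⟩

theorem lk_spec (ls : List Int) : ∀ (s : Int), s < ls.sum →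
    lk ls s ≤ ls.length ∧ s < psum ls (lk ls s + 1) ∧ ∀ j < lk ls s, psum ls (j + 1) ≤ s := by
  induction ls with
  | nil =>
    intro s h
    have hs : s < 0 := by simpa using h
    refine ⟨by simp [lk], by simpa [lk, psum] using hs, by intro j hj; simp [lk] at hj⟩
  | cons l rest ih =>
    intro s h
    by_cases hs : s < l
    · refine ⟨by simp [lk, hs], ?_, ?_⟩
      · simp [lk, hs, psum_cons_succ, psum_zero]
      · intro j hj; simp [lk, hs] at hj
    · have h' : s - l < rest.sum := by simp [List.sum_cons] at h; omega
      obtain ⟨h1, h2, h3⟩ := ih (s - l) h'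
      refine ⟨by simp [lk, hs]; omega, ?_, ?_⟩
      · simp only [lk, if_neg hs, psum_cons_succ]; omega
      · intro j hj
        simp only [lk, if_neg hs] at hj
        cases j with
        | zero => simpa [psum_cons_succ, psum_zero] using not_lt.mp hs
        | succ j' =>
          rw [psum_cons_succ]
          have := h3 j' (by omega); omega

theorem lk_iff (ls : List Int) (s : Int) (hnn : ∀ x ∈ ls, 0 ≤ x) (h : s < ls.sum) :
    ∀ j : Nat, (s < psum ls (j + 1) ↔ lk ls s ≤ j) := by
  obtain ⟨_, h2, h3⟩ := lk_spec ls s h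
  intro j
  constructor
  · intro hj
    by_contra hc
    exact absurd (h3 j (by omega)) (by omega)
  · intro hj
    have := psum_nonneg_mono ls hnn (Nat.add_le_add_right hj 1)
    omega

-- buildPrefix computed as a simple scan
def pfx : List Int → Int → List Int
  | [], _ => []
  | l :: rest, c => (c + l) :: pfx rest (c + l)

theorem buildPrefix_fold (onf : List (List String)) : ∀ (acc : List Int) (x : Int),
    onf.foldl (fun acc s => acc ++ [PySem.List.pyGetD acc (-1) 0 + (s.length : Int)]) (acc ++ [x])
      = acc ++ [x] ++ pfx (onf.map (fun s => (s.length : Int))) x := by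
  induction onf with
  | nil => intro acc x; simp [pfx]
  | cons s rest ih =>
    intro acc x
    simp only [List.foldl_cons, List.map_cons, pfx]
    rw [PySem.List.pyGetD_neg_one_append_singleton]
    have := ih (acc ++ [x]) (x + (s.length : Int))
    simpa [List.append_assoc] using this

theorem buildPrefix_eq (onf : List (List String)) :
    buildPrefix onf = 0 :: pfx (onf.map (fun s => (s.length : Int))) 0 := by
  have := buildPrefix_fold onf [] 0
  simpa [buildPrefix] using this

theorem pfx_getD (ls : List Int) : ∀ (c : Int) (j : Nat), j < ls.length →
    (pfx ls c).getD j 0 = c + psum ls (j + 1) := by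
  induction ls with
  | nil => intro c j h; simp at h
  | cons l rest ih =>
    intro c j h
    cases j with
    | zero => simp [pfx, psum_cons_succ, psum_zero]
    | succ j' =>
      simp only [pfx, List.getD_cons_succ]
      rw [ih (c + l) j' (by simpa using h), psum_cons_succ]
      ring

theorem prefix_getD (onf : List (List String)) (j : Nat) (h : j ≤ onf.length) :
    (buildPrefix onf).getD j 0 = psum (onf.map (fun s => (s.length : Int))) j := by
  rw [buildPrefix_eq]
  cases j with
  | zero => simp [psum_zero]
  | succ j' =>
    simp only [List.getD_cons_succ]
    rw [pfx_getD _ 0 j' (by simpa using h)]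
    simp

theorem bsr_eq_lk (onf : List (List String)) (s : Int)
    (h : s < (onf.map (fun s => (s.length : Int))).sum) :
    ∀ (fuel lo hi : Nat), hi - lo ≤ fuel → lo ≤ lk (onf.map (fun s => (s.length : Int))) s →
      lk (onf.map (fun s => (s.length : Int))) s ≤ hi → hi ≤ onf.length →
      bsr (buildPrefix onf) s fuel lo hi = lk (onf.map (fun s => (s.length : Int))) s := by
  set ls := onf.map (fun s => (s.length : Int)) with hls
  have hnn : ∀ x ∈ ls, 0 ≤ x := by
    intro x hx; rw [hls] at hx; simp at hx; obtain ⟨a, _, rfl⟩ := hx; positivity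
  have hlen : ls.length = onf.length := by rw [hls]; simp
  have hiff := lk_iff ls s hnn h
  intro fuel
  induction fuel with
  | zero =>
    intro lo hi hd hlo hhi hn
    simp only [bsr]
    omega
  | succ d ih =>
    intro lo hi hd hlo hhi hn
    simp only [bsr]
    by_cases hlt : lo < hi
    · rw [if_pos hlt]
      have hmidlt : (lo + hi) / 2 < hi := by omega
      have hmidge : lo ≤ (lo + hi) / 2 := by omega
      have hg : (buildPrefix onf).getD ((lo + hi) / 2 + 1) 0 = psum ls ((lo + hi) / 2 + 1) :=
        prefix_getD onf _ (by omega)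
      by_cases hc : s < (buildPrefix onf).getD ((lo + hi) / 2 + 1) 0
      · rw [if_pos hc]
        have hk : lk ls s ≤ (lo + hi) / 2 := (hiff _).mp (by rwa [hg] at hc)
        exact ih lo _ (by omega) hlo hk (by omega)
      · rw [if_neg hc]
        have hk : ¬ lk ls s ≤ (lo + hi) / 2 := fun hk => hc (by rw [hg]; exact (hiff _).mpr hk)
        exact ih _ hi (by omega) (by omega) hhi hn
    · rw [if_neg hlt]; omega

theorem pair_eq (onf : List (List String)) (p : Int × Int)
    (h : p.1 < (onf.map (fun s => (s.length : Int))).sum) :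
    pairA onf (onf.map (fun s => (s.length : Int))) p = pairB onf (buildPrefix onf) onf.length p := by
  have hlen : (onf.map (fun s => (s.length : Int))).length = onf.length := by simp
  have hnn : ∀ x ∈ onf.map (fun s => (s.length : Int)), 0 ≤ x := by
    intro x hx; simp at hx; obtain ⟨a, _, rfl⟩ := hx; positivity
  obtain ⟨h1, -, -⟩ := lk_spec (onf.map (fun s => (s.length : Int))) p.1 h
  have hk : bsr (buildPrefix onf) p.1 onf.length 0 onf.length
      = lk (onf.map (fun s => (s.length : Int))) p.1 :=
    bsr_eq_lk onf p.1 h onf.length 0 onf.length (by omega) (Nat.zero_le _) (by omega) (le_refl _)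
  have hbase : (buildPrefix onf).getD (lk (onf.map (fun s => (s.length : Int))) p.1) 0
      = psum (onf.map (fun s => (s.length : Int))) (lk (onf.map (fun s => (s.length : Int))) p.1) :=
    prefix_getD onf _ (by omega)
  simp only [pairA, pairB]
  rw [locA_eq (onf.map (fun s => (s.length : Int))) hnn 0 p.1 p.2 h (Or.inr rfl)]
  simp only [hk, hbase]
  simp

theorem go_eq (onf : List (List String)) (cl : List (List (Int × Int)))
    (hpre : Pre_find_coreference_terms onf cl) :
    goA onf (onf.map (fun s => (s.length : Int))) cl = goB onf (buildPrefix onf) onf.length cl := by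
  induction cl with
  | nil => rfl
  | cons c rest ih =>
    have hc := hpre c (by simp)
    have hrest : Pre_find_coreference_terms onf rest := fun c' hc' => hpre c' (List.mem_cons_of_mem _ hc')
    unfold goA goB
    by_cases h1 : c.length == 1
    · simp only [h1, if_true]; exact ih hrest
    · simp only [h1]
      have hmap : c.map (pairA onf (onf.map (fun s => (s.length : Int))))
          = c.map (pairB onf (buildPrefix onf) onf.length) := by
        apply List.map_congr_left
        intro p hp
        rcases hc with h | h
        · exact absurd (by simp [h]) h1
        · exact pair_eq onf p (h p hp).2
      rw [hmap, ih hrest]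

-- ===== VERDICT (by name: the statement is the Claim_ definition above) =====
theorem find_coreference_terms_spec : Claim_equal_find_coreference_terms := by
  intro onf cl _ hpre
  unfold Spec_find_coreference_terms find_coreference_terms find_coreference_terms_alt
  exact go_eq onf cl hpre
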